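-- pv_equiv track=rewrite | github.com/Syirasky/findcontouropencv | detectbubble.py | detect_row_coordinates
-- ===== SOURCE A (Python) =====
-- thpink = 180
--
-- def detect_row_coordinates(gray):
-- 	width, height = len(gray[0]), len(gray)
-- 	prev_dark = False
-- 	grid_y = []
-- 	for y in range(height):
-- 		now_dark = min(gray[y]) < thpink
-- 		if prev_dark != now_dark:
-- 			grid_y.append(y)
-- 			prev_dark = now_dark
-- 	# return center position
-- 	out = []
-- 	for y in range(1, len(grid_y), 2):
-- 		out.append(int((grid_y[y] + grid_y[y - 1]) / 2))
-- 	return out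
-- ===== SOURCE B (Python) =====
-- thpink = 180
--
-- def detect_row_coordinates(gray):
--     # Single pass: track the start of the current dark band and emit its
--     # center on the dark->light transition; no intermediate grid_y list,
--     # no second pairing pass.
--     out = []
--     prev_dark = False
--     start = 0
--     for y, row in enumerate(gray):
--         now_dark = min(row) < thpink
--         if now_dark and not prev_dark:
--             start = y
--         elif prev_dark and not now_dark:
--             out.append((y + start) // 2)
--         prev_dark = now_dark
--     return out
-- ===== Notes on version B (the rewrite author's own statement) =====
-- stated objective: simpler
-- what changed: B merges A's two passes (collect all transition rows into grid_y, then pair consecutive transitions) into one streaming pass that remembers only the start of the currently open dark band and emits each center directly on the dark-to-light transition, dropping the grid_y list and the index-pairing loop entirely.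
-- outside the precondition, e.g. on detect_row_coordinates([]): A raises IndexError, B returns []; on detect_row_coordinates([[]]): A raises ValueError, B raises ValueError
import Mathlib
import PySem

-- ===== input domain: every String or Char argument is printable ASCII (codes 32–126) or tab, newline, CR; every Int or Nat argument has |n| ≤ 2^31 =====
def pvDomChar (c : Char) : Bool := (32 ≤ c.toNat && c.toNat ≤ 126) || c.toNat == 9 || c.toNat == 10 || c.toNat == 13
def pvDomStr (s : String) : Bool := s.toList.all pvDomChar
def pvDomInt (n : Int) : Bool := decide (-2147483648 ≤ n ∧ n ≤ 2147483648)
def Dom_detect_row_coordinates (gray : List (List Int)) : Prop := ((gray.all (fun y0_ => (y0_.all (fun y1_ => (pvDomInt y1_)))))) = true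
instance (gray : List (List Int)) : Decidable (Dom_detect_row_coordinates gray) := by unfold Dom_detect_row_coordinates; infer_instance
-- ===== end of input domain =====

-- B merges A's two passes (transition list + pairing) into one streaming pass that
-- emits each band center on the dark->light transition (objective: simpler).

-- `min(row) < thpink` (thpink = 180); the .getD 0 default is never reached under Pre_ (rows nonempty)
def pvDark (row : List Int) : Bool := decide ((PySem.List.min? row id).getD 0 < 180)

-- ===== PORT A =====
-- body of A's first loop: `now_dark = min(gray[y]) < thpink; if prev_dark != now_dark: ...`
def pvStepA (gray : List (List Int)) (st : Bool × List Int) (y : Int) : Bool × List Int :=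
  let now_dark := pvDark (PySem.List.pyGetD gray y [])
  if st.1 != now_dark then (now_dark, st.2 ++ [y]) else st

-- A's second loop: `for y in range(1, len(grid_y), 2): out.append(int((grid_y[y] + grid_y[y-1]) / 2))`
-- int((a+b)/2): a,b are nonnegative row indices, so truncating float division = `/` on Int here
def pvPairLoopA (grid_y : List Int) : List Int :=
  (PySem.List.pyRange 1 (grid_y.length : Int) 2).foldl
    (fun out y => out ++ [(PySem.List.pyGetD grid_y y 0 + PySem.List.pyGetD grid_y (y - 1) 0) / 2]) []

-- width = len(gray[0]) is unused; in Python it raises IndexError on empty gray (excluded by Pre_)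
def detect_row_coordinates (gray : List (List Int)) : List Int :=
  pvPairLoopA ((PySem.List.pyRange 0 (gray.length : Int) 1).foldl (pvStepA gray)
    (false, ([] : List Int))).2

-- ===== PORT B =====
-- one iteration of B's loop body on state (prev_dark, start, out)
def pvStepB (st : Bool × Int × List Int) (p : Int × List Int) : Bool × Int × List Int :=
  let now_dark := pvDark p.2
  if now_dark && !st.1 then (now_dark, p.1, st.2.2)
  else if st.1 && !now_dark then (now_dark, st.2.1, st.2.2 ++ [PySem.Int.floordiv (p.1 + st.2.1) 2])
  else (now_dark, st.2.1, st.2.2)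

def detect_row_coordinates_alt (gray : List (List Int)) : List Int :=
  ((PySem.List.enumerate gray 0).foldl pvStepB (false, (0 : Int), ([] : List Int))).2.2

-- ===== PRECONDITION & SPEC =====
-- Pre_ excludes exactly the inputs where Python A raises: empty gray (IndexError at gray[0])
-- and any empty row (ValueError from min([])).
def Pre_detect_row_coordinates (gray : List (List Int)) : Prop :=
  gray ≠ [] ∧ ∀ row ∈ gray, row ≠ []
instance (gray : List (List Int)) : Decidable (Pre_detect_row_coordinates gray) := by
  unfold Pre_detect_row_coordinates; infer_instance

def pvWitness_detect_row_coordinates : List (List Int) := [[200], [100], [250]]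

def Spec_detect_row_coordinates (gray : List (List Int)) (out : List Int) : Prop := out = detect_row_coordinates_alt gray
instance (gray : List (List Int)) (out : List Int) : Decidable (Spec_detect_row_coordinates gray out) := by unfold Spec_detect_row_coordinates; infer_instance

-- ===== CLAIM (what is proved, stated in full; the proofs are below) =====
def Claim_equal_detect_row_coordinates : Prop := ∀ (gray : List (List Int)), Dom_detect_row_coordinates gray → Pre_detect_row_coordinates gray → Spec_detect_row_coordinates gray (detect_row_coordinates gray)

-- ===== LEMMAS AND PROOFS =====

-- recursive restatement of A's first (transition-collecting) loop
def pvScan : List (List Int) → Int → (Bool × List Int) → (Bool × List Int)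
  | [], _, st => st
  | r :: rs, y, st =>
      pvScan rs (y + 1) (if st.1 != pvDark r then (pvDark r, st.2 ++ [y]) else st)

-- recursive restatement of B's streaming pass (output only)
def pvGo : List (List Int) → Int → Bool → Int → List Int
  | [], _, _, _ => []
  | r :: rs, y, prev, s =>
      let now := pvDark r
      if now && !prev then pvGo rs (y + 1) now y
      else if prev && !now then PySem.Int.floordiv (y + s) 2 :: pvGo rs (y + 1) now s
      else pvGo rs (y + 1) now s

-- pairing of consecutive transitions, as A's second loop computes it
def pvPairs : List Int → List Int
  | [] => []
  | [_] => []
  | a :: b :: t => (b + a) / 2 :: pvPairs t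

@[simp] theorem pvPairs_nil : pvPairs [] = [] := rfl
@[simp] theorem pvPairs_single (a : Int) : pvPairs [a] = [] := rfl
@[simp] theorem pvPairs_cons₂ (a b : Int) (t : List Int) :
    pvPairs (a :: b :: t) = (b + a) / 2 :: pvPairs t := rfl

theorem pvPairs_append_even (l : List Int) (h : Even l.length) (r : List Int) :
    pvPairs (l ++ r) = pvPairs l ++ pvPairs r := by
  induction l using pvPairs.induct with
  | case1 => simp
  | case2 a => simp at h
  | case3 a b t ih =>
      simp only [List.cons_append, pvPairs_cons₂]
      rw [ih (by simpa [Nat.even_add_one, parity_simps] using h)]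

-- A's foldl over range(height) equals pvScan on the dropped suffix
theorem pvScan_eq (gray : List (List Int)) :
    ∀ (n k : Nat) (st : Bool × List Int), gray.length - k = n →
      (PySem.List.pyRange (k : Int) (gray.length : Int) 1).foldl (pvStepA gray) st
      = pvScan (gray.drop k) (k : Int) st := by
  intro n
  induction n with
  | zero =>
      intro k st hk
      have hle : gray.length ≤ k := by omega
      rw [PySem.List.pyRange_one_eq_nil (by exact_mod_cast hle), List.drop_eq_nil_of_le hle]
      rfl
  | succ m ih =>
      intro k st hk
      have hlt : k < gray.length := by omega
      rw [PySem.List.pyRange_one_cons (by exact_mod_cast hlt), List.drop_eq_getElem_cons hlt]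
      simp only [List.foldl_cons, pvScan]
      have hget : PySem.List.pyGetD gray (k : Int) [] = gray[k] := by
        rw [PySem.List.pyGetD_eq_getElem gray [] (by positivity) (by exact_mod_cast hlt)]
        simp
      have hstep : pvStepA gray st (k : Int)
          = (if st.1 != pvDark gray[k] then (pvDark gray[k], st.2 ++ [(k : Int)]) else st) := by
        simp [pvStepA, hget]
      rw [hstep]
      have hcast : ((k : Int) + 1) = ((k + 1 : Nat) : Int) := by push_cast; ring
      rw [hcast, ih (k + 1) _ (by omega)]

theorem pvScan_eq0 (gray : List (List Int)) (st : Bool × List Int) :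
    (PySem.List.pyRange 0 (gray.length : Int) 1).foldl (pvStepA gray) st
      = pvScan gray 0 st := by
  have h := pvScan_eq gray gray.length 0 st (by omega)
  simpa using h

-- B's foldl over enumerate accumulates exactly pvGo
theorem pvGo_eq (rows : List (List Int)) :
    ∀ (y : Int) (prev : Bool) (s : Int) (out : List Int),
      ((PySem.List.enumerate rows y).foldl pvStepB (prev, s, out)).2.2
      = out ++ pvGo rows y prev s := by
  induction rows with
  | nil => intro y prev s out; simp [PySem.List.enumerate_nil, pvGo]
  | cons r rs ih =>
      intro y prev s out
      rw [PySem.List.enumerate_cons, List.foldl_cons]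
      have hstep : pvStepB (prev, s, out) (y, r)
        = (pvDark r, if pvDark r && !prev then y else s,
           if prev && !(pvDark r) then out ++ [PySem.Int.floordiv (y + s) 2] else out) := by
        cases prev <;> cases hnow : pvDark r <;> simp [pvStepB, hnow]
      rw [hstep, ih (y + 1) (pvDark r) _ _]
      cases prev <;> cases hnow : pvDark r <;> simp [pvGo, hnow]

-- A's pairing loop equals pvPairs
theorem pvPairLoop_eq (l : List Int) : pvPairLoopA l = pvPairs l := by
  unfold pvPairLoopA
  rw [PySem.List.foldl_append_singleton_eq_map]
  simp only [List.nil_append]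
  induction l using pvPairs.induct with
  | case1 => simp [PySem.List.pyRange_of_pos (s := 2) 1 0 (by norm_num)]
  | case2 a => simp [PySem.List.pyRange_of_pos (s := 2) 1 1 (by norm_num)]
  | case3 a b t ih =>
      have hlen : ((a :: b :: t).length : Int) = (t.length : Int) + 2 := by simp; ring
      rw [hlen, PySem.List.pyRange_of_pos (s := 2) 1 ((t.length : Int) + 2) (by norm_num),
          pvPairs_cons₂]
      have hq : ((((t.length : Int) + 2) - 1 + 2 - 1) / 2).toNat
          = (((t.length : Int) - 1 + 2 - 1) / 2).toNat + 1 := by omega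
      rw [if_pos (by omega), hq, List.range_succ_eq_map]
      simp only [List.map_cons, List.map_map]
      congr 1
      · norm_num [PySem.List.pyGetD_ofNat']
      · rcases t with _ | ⟨x, _ | ⟨x2, t'⟩⟩
        · simp
        · norm_num
        · rw [PySem.List.pyRange_of_pos (s := 2) 1 ((x :: x2 :: t').length : Int) (by norm_num)] at ih
          rw [if_pos (by simp)] at ih
          rw [← ih, List.map_map, List.map_inj_left]
          intro k hk
          simp only [Function.comp]
          have h2 : ((1 : Int) + 2 * ↑(k + 1)) = ((2 * k + 3 : Nat) : Int) := by push_cast; ring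
          have h1 : ((1 : Int) + 2 * ↑k) = ((2 * k + 1 : Nat) : Int) := by push_cast; ring
          rw [h2, h1, PySem.List.pyGetD_natCast, PySem.List.pyGetD_natCast,
              show ((2 * k + 3 : Nat) : Int) - 1 = ((2 * k + 2 : Nat) : Int) by push_cast; ring,
              show ((2 * k + 1 : Nat) : Int) - 1 = ((2 * k : Nat) : Int) by push_cast; ring,
              PySem.List.pyGetD_natCast, PySem.List.pyGetD_natCast]
          simp [List.getD]

-- main invariant: pairing A's transition list = B's streamed centers
theorem pvMain (rows : List (List Int)) :
    ∀ (y : Int),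
      (∀ (acc : List Int) (s : Int), Even acc.length →
        pvPairs (pvScan rows y (false, acc)).2 = pvPairs acc ++ pvGo rows y false s) ∧
      (∀ (acc : List Int) (s : Int), Even acc.length →
        pvPairs (pvScan rows y (true, acc ++ [s])).2 = pvPairs acc ++ pvGo rows y true s) := by
  induction rows with
  | nil =>
      intro y
      constructor
      · intro acc s _; simp [pvScan, pvGo]
      · intro acc s h
        simp only [pvScan, pvGo]
        rw [pvPairs_append_even acc h [s]]
        simp
  | cons r rs ih =>
      intro y
      constructor
      · intro acc s h
        cases hnow : pvDark r with
        | false =>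
            simp only [pvScan, pvGo, hnow]
            simpa using (ih (y + 1)).1 acc s h
        | true =>
            simp only [pvScan, pvGo, hnow]
            simpa using (ih (y + 1)).2 acc y h
      · intro acc s h
        cases hnow : pvDark r with
        | false =>
            simp only [pvScan, pvGo, hnow]
            have h2 : Even (acc ++ [s, y]).length := by
              simpa [Nat.even_add_one, parity_simps] using h
            have hrec := (ih (y + 1)).1 (acc ++ [s, y]) s h2
            have hfd : PySem.Int.floordiv (y + s) 2 = (y + s) / 2 :=
              PySem.Int.floordiv_eq_ediv_of_pos (by norm_num)
            simp only [List.append_assoc, List.cons_append, List.nil_append] at hrec ⊢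
            rw [hfd]
            norm_num [hrec, pvPairs_append_even acc h [s, y]]
        | true =>
            simp only [pvScan, pvGo, hnow]
            simpa using (ih (y + 1)).2 acc s h

-- ===== VERDICT (by name: the statement is the Claim_ definition above) =====
theorem detect_row_coordinates_spec : Claim_equal_detect_row_coordinates := by
  intro gray _ _
  unfold Spec_detect_row_coordinates detect_row_coordinates detect_row_coordinates_alt
  rw [pvScan_eq0, pvPairLoop_eq, pvGo_eq gray 0 false 0 []]
  simpa using (pvMain gray 0).1 [] 0 (by simp)
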